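-- pv_equiv track=rewrite | github.com/pypi-data/pypi-mirror-400 | packages/webgpu/webgpu-1.1.0-py3-none-any.whl/webgpu/utils.py | _handle_ifdef
-- ===== SOURCE A (Python) =====
-- def _handle_ifdef(code: str, defines: dict[str, str]) -> str:
--     lines = code.splitlines()
--     result = []
--     stack = []
--
--     for lineno, line in enumerate(lines, 1):
--         stripped = line.strip()
--
--         if stripped.startswith("#ifdef"):
--             parts = stripped.split()
--             if len(parts) != 2:
--                 raise ValueError(f"Syntax error at line {lineno}: {line}")
--             token = parts[1]
--             is_enabled = token in defines
--             stack.append((token, is_enabled, False))  # (token, include_block, else_encountered)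
--             continue
--
--         elif stripped.startswith("#else"):
--             parts = stripped.split()
--             if len(parts) != 2:
--                 raise ValueError(f"Syntax error at line {lineno}: {line}")
--             token = parts[1]
--             if not stack or stack[-1][0] != token:
--                 raise ValueError(f"Mismatched #else {token} at line {lineno}")
--             if stack[-1][2]:
--                 raise ValueError(f"Multiple #else for token {token} at line {lineno}")
--             old_token, old_include, _ = stack.pop()
--             # Invert the inclusion logic for the else block
--             stack.append((old_token, not old_include, True))
--             continue
--
--         elif stripped.startswith("#endif"):
--             parts = stripped.split()
--             if len(parts) != 2:
--                 raise ValueError(f"Syntax error at line {lineno}: {line}")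
--             token = parts[1]
--             if not stack or stack[-1][0] != token:
--                 raise ValueError(f"Mismatched #endif {token} at line {lineno}")
--             stack.pop()
--             continue
--
--         # Include line if all conditions above it evaluate to True
--         if all(frame[1] for frame in stack):
--             result.append(line)
--
--     if stack:
--         tokens_left = ", ".join(token for token, *_ in stack)
--         raise ValueError(f"Unmatched #ifdef(s): {tokens_left}")
--
--     return "\n".join(result)
-- ===== SOURCE B (Python) =====
-- def _classify(line):
--     stripped = line.strip()
--     for directive in ("#ifdef", "#else", "#endif"):
--         if stripped.startswith(directive):
--             parts = stripped.split()
--             if len(parts) == 2: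
--                 return (directive[1:], parts[1])
--             return ("bad", None)
--     return ("text", None)
--
--
-- def _handle_ifdef(code: str, defines: dict[str, str]) -> str:
--     lines = code.splitlines()
--     # pass 1: lex every line into a directive kind (or plain text)
--     toks = [_classify(line) for line in lines]
--
--     # pass 2: execute; a line is emitted iff no enclosing frame is disabled,
--     # tracked by a running counter instead of rescanning the stack
--     result = []
--     stack = []  # (token, included_now, else_seen)
--     disabled = 0  # number of frames whose current branch is excluded
--     for lineno, ((kind, token), line) in enumerate(zip(toks, lines), 1):
--         if kind == "bad":
--             raise ValueError(f"Syntax error at line {lineno}: {line}")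
--         elif kind == "text":
--             if disabled == 0:
--                 result.append(line)
--         elif kind == "ifdef":
--             enabled = token in defines
--             stack.append((token, enabled, False))
--             if not enabled:
--                 disabled += 1
--         elif kind == "else":
--             if not stack or stack[-1][0] != token:
--                 raise ValueError(f"Mismatched #else {token} at line {lineno}")
--             t0, included, else_seen = stack[-1]
--             if else_seen:
--                 raise ValueError(f"Multiple #else for token {token} at line {lineno}")
--             stack[-1] = (t0, not included, True)
--             disabled += 1 if included else -1
--         else:  # endif
--             if not stack or stack[-1][0] != token:
--                 raise ValueError(f"Mismatched #endif {token} at line {lineno}")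
--             _, included, _ = stack.pop()
--             if not included:
--                 disabled -= 1
--
--     if stack:
--         raise ValueError("Unmatched #ifdef(s): " + ", ".join(t for t, *_ in stack))
--     return "\n".join(result)
-- ===== Notes on version B (the rewrite author's own statement) =====
-- stated objective: alternative
-- what changed: B splits the work into a lexer pass that classifies every line into a directive token and an interpreter pass that dispatches on those tokens, and it replaces A's per-line all(frame[1] for frame in stack) rescan by a running count of disabled frames (emit a line iff the count is 0).
import Mathlib
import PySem

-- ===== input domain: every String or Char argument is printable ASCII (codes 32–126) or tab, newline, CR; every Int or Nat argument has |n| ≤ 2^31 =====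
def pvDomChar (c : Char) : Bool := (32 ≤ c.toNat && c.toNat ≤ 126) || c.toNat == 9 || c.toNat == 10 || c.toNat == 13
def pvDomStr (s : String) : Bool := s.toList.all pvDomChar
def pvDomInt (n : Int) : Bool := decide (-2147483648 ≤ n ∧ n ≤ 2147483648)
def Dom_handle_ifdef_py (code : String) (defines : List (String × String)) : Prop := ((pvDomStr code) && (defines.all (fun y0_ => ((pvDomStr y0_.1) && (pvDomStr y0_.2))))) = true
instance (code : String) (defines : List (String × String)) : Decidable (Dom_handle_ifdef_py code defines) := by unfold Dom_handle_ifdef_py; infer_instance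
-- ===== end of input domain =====

-- B lexes every line into a directive token first and then interprets the token
-- stream with a running count of disabled frames (emit a line iff the count is 0),
-- instead of A's single loop that rescans the whole stack for every ordinary line.

-- ===== PORT A =====
-- One loop iteration of A; state = none once a ValueError has been raised,
-- otherwise some (stack, result).  Stack top is the list head (Python appends/pops
-- at the end; the mapping is positional only, all accesses are to the top).
-- lineno is only used in the error messages, so it is not carried.
def pvAStepCore (defines : List (String × String))
    (stack : List (String × Bool × Bool)) (result : List String) (line : String) :
    Option (List (String × Bool × Bool) × List String) :=
    -- stripped = line.strip(); parts = stripped.split(); token = parts[1] (inlined)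
    if PySem.Str.startswith (PySem.Str.strip line) "#ifdef" then
      if (PySem.Str.split₀ (PySem.Str.strip line)).length ≠ 2 then none
      else match PySem.List.pyGet? (PySem.Str.split₀ (PySem.Str.strip line)) 1 with
        | none => none
        | some token =>
          some ((token, (PySem.Dict.mk defines).contains token, false) :: stack, result)
    else if PySem.Str.startswith (PySem.Str.strip line) "#else" then
      if (PySem.Str.split₀ (PySem.Str.strip line)).length ≠ 2 then none
      else match PySem.List.pyGet? (PySem.Str.split₀ (PySem.Str.strip line)) 1 with
        | none => none
        | some token =>
          match stack with
          | [] => none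
          | (t, inc, els) :: rest =>
            if t ≠ token then none
            else if els then none
            else some ((t, !inc, true) :: rest, result)
    else if PySem.Str.startswith (PySem.Str.strip line) "#endif" then
      if (PySem.Str.split₀ (PySem.Str.strip line)).length ≠ 2 then none
      else match PySem.List.pyGet? (PySem.Str.split₀ (PySem.Str.strip line)) 1 with
        | none => none
        | some token =>
          match stack with
          | [] => none
          | (t, _, _) :: rest =>
            if t ≠ token then none
            else some (rest, result)
    else
      if stack.all (fun f => f.2.1) then some (stack, result ++ [line])
      else some (stack, result)

def pvAStep (defines : List (String × String))
    (st : Option (List (String × Bool × Bool) × List String)) (line : String) :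
    Option (List (String × Bool × Bool) × List String) :=
  match st with
  | none => none
  | some (stack, result) => pvAStepCore defines stack result line

def handle_ifdef_py (code : String) (defines : List (String × String)) : String :=
  match (PySem.Str.splitlines code).foldl (pvAStep defines) (some ([], [])) with
  | none => ""          -- ValueError path; excluded by Pre_
  | some (stack, result) =>
    if stack ≠ [] then ""   -- unmatched #ifdef → ValueError; excluded by Pre_
    else PySem.Str.join "\n" result

-- ===== PORT B =====
-- Pass 1: the lexer.  _classify's loop over the three directive words is unrolled
-- into three ifs ("bad", None) / ("text", None) become the constructors bad / text.
inductive PvTok : Type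
  | text : PvTok
  | bad : PvTok
  | ifdef : String → PvTok
  | els : String → PvTok
  | endif : String → PvTok
deriving DecidableEq, Repr

def pvClassify (line : String) : PvTok :=
  -- stripped = line.strip() (inlined, as in the port of A)
  if PySem.Str.startswith (PySem.Str.strip line) "#ifdef" then
    match PySem.Str.split₀ (PySem.Str.strip line) with
    | [_, t] => .ifdef t
    | _ => .bad
  else if PySem.Str.startswith (PySem.Str.strip line) "#else" then
    match PySem.Str.split₀ (PySem.Str.strip line) with
    | [_, t] => .els t
    | _ => .bad
  else if PySem.Str.startswith (PySem.Str.strip line) "#endif" then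
    match PySem.Str.split₀ (PySem.Str.strip line) with
    | [_, t] => .endif t
    | _ => .bad
  else .text

-- Pass 2: the interpreter.  State = none after a raise, otherwise
-- some (stack of (token, included_now, else_seen), disabled counter, result).
def pvExec (d : PySem.Dict String String)
    (st : Option (List (String × Bool × Bool) × Int × List String)) (p : PvTok × String) :
    Option (List (String × Bool × Bool) × Int × List String) :=
  match st with
  | none => none
  | some (stk, dis, res) =>
    match p.1 with
    | .bad => none
    | .text => if dis = 0 then some (stk, dis, res ++ [p.2]) else some (stk, dis, res)
    | .ifdef t =>
      some ((t, d.contains t, false) :: stk,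
            (if d.contains t then dis else dis + 1), res)
    | .els t =>
      match stk with
      | [] => none
      | (t0, inc, els) :: rest =>
        if t0 ≠ t then none
        else if els then none
        else some ((t0, !inc, true) :: rest, (if inc then dis + 1 else dis - 1), res)
    | .endif t =>
      match stk with
      | [] => none
      | (t0, inc, _) :: rest =>
        if t0 ≠ t then none
        else some (rest, (if inc then dis else dis - 1), res)

def handle_ifdef_py_alt (code : String) (defines : List (String × String)) : String :=
  let lines := PySem.Str.splitlines code
  let toks := lines.map pvClassify
  match (toks.zip lines).foldl (pvExec (PySem.Dict.mk defines)) (some ([], 0, [])) with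
  | none => ""
  | some (stack, _, result) =>
    if stack ≠ [] then ""
    else PySem.Str.join "\n" result

-- ===== PRECONDITION & SPEC =====
-- Syntax check for the directives only (independent of defines and of either port's
-- output): each #ifdef/#else/#endif line has exactly two words, #else/#endif match
-- the innermost open #ifdef's token, at most one #else per block, all blocks closed.
-- State = some (list of (token, else_seen)), none once malformed.
def pvPreStepCore (stack : List (String × Bool)) (line : String) :
    Option (List (String × Bool)) :=
    if PySem.Str.startswith (PySem.Str.strip line) "#ifdef" then
      if (PySem.Str.split₀ (PySem.Str.strip line)).length ≠ 2 then none
      else match PySem.List.pyGet? (PySem.Str.split₀ (PySem.Str.strip line)) 1 with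
        | none => none
        | some token => some ((token, false) :: stack)
    else if PySem.Str.startswith (PySem.Str.strip line) "#else" then
      if (PySem.Str.split₀ (PySem.Str.strip line)).length ≠ 2 then none
      else match PySem.List.pyGet? (PySem.Str.split₀ (PySem.Str.strip line)) 1 with
        | none => none
        | some token =>
          match stack with
          | [] => none
          | (t, els) :: rest =>
            if t ≠ token then none
            else if els then none
            else some ((t, true) :: rest)
    else if PySem.Str.startswith (PySem.Str.strip line) "#endif" then
      if (PySem.Str.split₀ (PySem.Str.strip line)).length ≠ 2 then none
      else match PySem.List.pyGet? (PySem.Str.split₀ (PySem.Str.strip line)) 1 with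
        | none => none
        | some token =>
          match stack with
          | [] => none
          | (t, _) :: rest =>
            if t ≠ token then none
            else some rest
    else some stack

def pvPreStep (st : Option (List (String × Bool))) (line : String) :
    Option (List (String × Bool)) :=
  match st with
  | none => none
  | some stack => pvPreStepCore stack line

-- Pre_ excludes exactly the inputs on which A raises ValueError (malformed,
-- mismatched or unclosed directives); A returns on every other input.
def Pre_handle_ifdef_py (code : String) (defines : List (String × String)) : Prop :=
  (PySem.Str.splitlines code).foldl pvPreStep (some []) = some []
instance (code : String) (defines : List (String × String)) : Decidable (Pre_handle_ifdef_py code defines) := by unfold Pre_handle_ifdef_py; infer_instance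

def pvWitness_handle_ifdef_py : String × (List (String × String)) :=
  ("x", [("A", "1")])

def Spec_handle_ifdef_py (code : String) (defines : List (String × String)) (out : String) : Prop := out = handle_ifdef_py_alt code defines
instance (code : String) (defines : List (String × String)) (out : String) : Decidable (Spec_handle_ifdef_py code defines out) := by unfold Spec_handle_ifdef_py; infer_instance

-- ===== CLAIM (what is proved, stated in full; the proofs are below) =====
def Claim_equal_handle_ifdef_py : Prop := ∀ (code : String) (defines : List (String × String)), Dom_handle_ifdef_py code defines → Pre_handle_ifdef_py code defines → Spec_handle_ifdef_py code defines (handle_ifdef_py code defines)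

-- ===== LEMMAS AND PROOFS =====

-- number of disabled frames on an A-stack
def pvCountF (s : List (String × Bool × Bool)) : Int :=
  ((s.filter (fun f => !f.2.1)).length : Int)

-- embed an A-state into a B-state
def pvE (x : List (String × Bool × Bool) × List String) :
    List (String × Bool × Bool) × Int × List String :=
  (x.1, pvCountF x.1, x.2)

-- project an A-state onto a Pre-state
def pvQ (x : List (String × Bool × Bool) × List String) : List (String × Bool) :=
  x.1.map (fun f => (f.1, f.2.2))

lemma pvCountF_cons (t : String) (i e : Bool) (s : List (String × Bool × Bool)) :
    pvCountF ((t, i, e) :: s) = (if i then 0 else 1) + pvCountF s := by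
  cases i <;> simp [pvCountF, List.filter]
  omega

lemma pvCountF_nonneg (s : List (String × Bool × Bool)) : (0 : Int) ≤ pvCountF s := by
  simp [pvCountF]

lemma pvCountF_eq_zero_iff (s : List (String × Bool × Bool)) :
    pvCountF s = 0 ↔ s.all (fun f => f.2.1) = true := by
  induction s with
  | nil => simp [pvCountF]
  | cons f rest ih =>
    obtain ⟨t, i, e⟩ := f
    rw [pvCountF_cons]
    have hnn := pvCountF_nonneg rest
    cases i
    · simp only [if_neg (by simp : ¬ (false = true))]
      constructor
      · intro h; omega
      · intro h; simp [List.all_cons] at h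
    · simpa [List.all_cons] using ih

-- one B-step on the lexed line simulates one A-step
lemma pvExec_classify (defines : List (String × String))
    (stack : List (String × Bool × Bool)) (disr : Int) (result : List String)
    (line : String) (hdis : disr = pvCountF stack) :
    pvExec (PySem.Dict.mk defines) (some (stack, disr, result)) (pvClassify line, line)
      = Option.map pvE (pvAStepCore defines stack result line) := by
  subst hdis
  unfold pvAStepCore pvClassify pvExec
  generalize PySem.Str.strip line = stripped
  generalize hp : PySem.Str.split₀ stripped = parts
  generalize PySem.Str.startswith stripped "#ifdef" = c1
  generalize PySem.Str.startswith stripped "#else" = c2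
  generalize PySem.Str.startswith stripped "#endif" = c3
  clear hp
  cases c1
  · cases c2
    · cases c3
      · -- ordinary line
        by_cases hz : pvCountF stack = 0
        · simp only [Bool.false_eq_true, if_false, if_pos hz,
            if_pos ((pvCountF_eq_zero_iff stack).mp hz)]
          rfl
        · simp only [Bool.false_eq_true, if_false, if_neg hz,
            if_neg (fun h => hz ((pvCountF_eq_zero_iff stack).mpr h))]
          rfl
      · -- #endif
        match parts with
        | [x, y] =>
          cases stack with
          | nil => rfl
          | cons f rest =>
            obtain ⟨t, inc, els⟩ := f
            by_cases ht : t = y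
            · subst ht
              cases inc
              · simp [pvE, pvCountF_cons, PySem.List.pyGet?, PySem.List.pyIdx?]
              · simp [pvE, pvCountF_cons, PySem.List.pyGet?, PySem.List.pyIdx?]
            · simp [ht, PySem.List.pyGet?, PySem.List.pyIdx?]
        | [] => rfl
        | [x] => rfl
        | x :: y :: z :: r => rfl
    · -- #else
      match parts with
      | [x, y] =>
        cases stack with
        | nil => rfl
        | cons f rest =>
          obtain ⟨t, inc, els⟩ := f
          by_cases ht : t = y
          · subst ht
            cases els
            · cases inc
              · simp [pvE, pvCountF_cons, PySem.List.pyGet?, PySem.List.pyIdx?]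
              · simp [pvE, pvCountF_cons, PySem.List.pyGet?, PySem.List.pyIdx?]; omega
            · simp [PySem.List.pyGet?, PySem.List.pyIdx?]
          · simp [ht, PySem.List.pyGet?, PySem.List.pyIdx?]
      | [] => rfl
      | [x] => rfl
      | x :: y :: z :: r => rfl
  · -- #ifdef
    match parts with
    | [x, y] =>
      by_cases hc : (PySem.Dict.mk defines).contains y = true
      · simp [hc, pvE, pvCountF_cons, PySem.List.pyGet?, PySem.List.pyIdx?]
      · simp only [Bool.not_eq_true] at hc
        simp [hc, pvE, pvCountF_cons, PySem.List.pyGet?, PySem.List.pyIdx?]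
        omega
    | [] => rfl
    | [x] => rfl
    | x :: y :: z :: r => rfl

lemma pvFold_b (defines : List (String × String)) :
    ∀ (lines : List String) (st : Option (List (String × Bool × Bool) × List String)),
      ((lines.map pvClassify).zip lines).foldl (pvExec (PySem.Dict.mk defines))
          (Option.map pvE st)
        = Option.map pvE (lines.foldl (pvAStep defines) st) := by
  intro lines
  induction lines with
  | nil => intro st; rfl
  | cons l ls ih =>
    intro st
    simp only [List.map_cons, List.zip_cons_cons, List.foldl_cons]
    cases st with
    | none => rw [show pvExec (PySem.Dict.mk defines) (Option.map pvE none)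
        (pvClassify l, l) = Option.map pvE (pvAStep defines none l) from rfl]; exact ih none
    | some p =>
      obtain ⟨stack, result⟩ := p
      rw [show Option.map pvE (some (stack, result)) = some (stack, pvCountF stack, result)
            from rfl,
          pvExec_classify defines stack (pvCountF stack) result l rfl]
      exact ih (pvAStepCore defines stack result l)

lemma pvStepCore_pre (defines : List (String × String))
    (stack : List (String × Bool × Bool)) (result : List String) (line : String) :
    pvPreStepCore (pvQ (stack, result)) line
      = Option.map pvQ (pvAStepCore defines stack result line) := by
  unfold pvAStepCore pvPreStepCore
  generalize PySem.Str.strip line = stripped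
  generalize PySem.Str.split₀ stripped = parts
  generalize PySem.Str.startswith stripped "#ifdef" = c1
  generalize PySem.Str.startswith stripped "#else" = c2
  generalize PySem.Str.startswith stripped "#endif" = c3
  simp only [pvQ]
  split_ifs with h1 h2 h3 h4 h5 h6
  · rfl
  · cases hg : PySem.List.pyGet? parts 1 with
    | none => rfl
    | some token => rfl
  · rfl
  · cases hg : PySem.List.pyGet? parts 1 with
    | none => rfl
    | some token =>
      cases stack with
      | nil => rfl
      | cons f rest =>
        obtain ⟨t, inc, els⟩ := f
        simp only [List.map_cons]
        split_ifs <;> rfl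
  · rfl
  · cases hg : PySem.List.pyGet? parts 1 with
    | none => rfl
    | some token =>
      cases stack with
      | nil => rfl
      | cons f rest =>
        obtain ⟨t, inc, els⟩ := f
        simp only [List.map_cons]
        split_ifs <;> rfl
  · rfl
  · rfl

lemma pvStep_pre (defines : List (String × String))
    (st : Option (List (String × Bool × Bool) × List String)) (line : String) :
    pvPreStep (Option.map pvQ st) line = Option.map pvQ (pvAStep defines st line) := by
  cases st with
  | none => rfl
  | some p =>
    obtain ⟨stack, result⟩ := p
    exact pvStepCore_pre defines stack result line

lemma pvFoldl_pre (defines : List (String × String)) :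
    ∀ (l : List String) (st : Option (List (String × Bool × Bool) × List String)),
      l.foldl pvPreStep (Option.map pvQ st) = Option.map pvQ (l.foldl (pvAStep defines) st) := by
  intro l
  induction l with
  | nil => intro st; rfl
  | cons x xs ih =>
    intro st
    simp only [List.foldl_cons]
    rw [pvStep_pre defines st x, ih]

-- ===== VERDICT (by name: the statement is the Claim_ definition above) =====
theorem handle_ifdef_py_spec : Claim_equal_handle_ifdef_py := by
  unfold Claim_equal_handle_ifdef_py
  intro code defines _ hpre
  unfold Spec_handle_ifdef_py handle_ifdef_py handle_ifdef_py_alt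
  unfold Pre_handle_ifdef_py at hpre
  have hq := pvFoldl_pre defines (PySem.Str.splitlines code) (some ([], []))
  have hb := pvFold_b defines (PySem.Str.splitlines code) (some ([], []))
  have hq0 : Option.map pvQ (some (([], []) : List (String × Bool × Bool) × List String))
      = some [] := rfl
  have hb0 : Option.map pvE (some (([], []) : List (String × Bool × Bool) × List String))
      = some ([], 0, []) := rfl
  rw [hq0] at hq
  rw [hb0] at hb
  cases hA : (PySem.Str.splitlines code).foldl (pvAStep defines) (some ([], [])) with
  | none =>
    rw [hA] at hq
    rw [hq] at hpre
    exact absurd hpre (by simp)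
  | some p =>
    obtain ⟨s, r⟩ := p
    rw [hA] at hq hb
    rw [hq] at hpre
    have hs : s = [] := by
      simp only [Option.map_some, pvQ, Option.some.injEq] at hpre
      exact List.map_eq_nil_iff.mp hpre
    subst hs
    simp only [hb]
    rfl
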